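-- pv_equiv track=rewrite | github.com/a1ive/grub2-filemanager | boot/python/rlcompleter_extra.py | undercmp
-- ===== SOURCE A (Python) =====
-- def undercmp(s1, s2):
--     """Compare two strings, sorting leading underscores last."""
--     if s1.startswith("_"):
--         if s2.startswith("_"):
--             return undercmp(s1[1:], s2[1:])
--         return 1
--     if s2.startswith("_"):
--         return -1
--     return cmp(s1, s2)
-- ===== SOURCE B (Python) =====
-- def undercmp(s1, s2):
--     """Compare two strings, sorting leading underscores last."""
--     a = len(s1) - len(s1.lstrip('_'))
--     b = len(s2) - len(s2.lstrip('_'))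
--     if a != b:
--         return 1 if a > b else -1
--     t1, t2 = s1[a:], s2[b:]
--     return (t1 > t2) - (t1 < t2)
-- ===== Notes on version B (the rewrite author's own statement) =====
-- stated objective: simpler
-- what changed: Replaces the per-underscore recursion with a single count of leading underscores on each string, a direct comparison of the two counts, and a three-way lexicographic comparison of the stripped suffixes.
-- crash fix: On inputs whose leading-underscore counts are equal, A reaches its call to the name 'cmp', which the module never defines, and raises NameError; B returns the three-way lexicographic comparison (-1/0/1) of the suffixes after the common underscore prefix. — e.g. on undercmp("a", "b"): A raises NameError, B returns -1
import Mathlib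
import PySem

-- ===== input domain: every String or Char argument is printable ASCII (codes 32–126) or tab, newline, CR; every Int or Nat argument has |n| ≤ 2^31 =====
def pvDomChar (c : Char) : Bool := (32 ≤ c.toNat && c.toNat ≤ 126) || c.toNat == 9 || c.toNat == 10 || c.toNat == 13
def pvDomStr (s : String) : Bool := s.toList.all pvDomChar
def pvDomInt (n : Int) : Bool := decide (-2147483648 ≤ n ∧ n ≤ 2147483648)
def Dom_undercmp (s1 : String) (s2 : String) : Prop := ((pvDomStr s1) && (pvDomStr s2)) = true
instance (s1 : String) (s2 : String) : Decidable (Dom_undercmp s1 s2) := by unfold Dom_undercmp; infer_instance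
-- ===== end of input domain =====

-- B replaces A's per-underscore recursion with count-then-compare (objective: simpler);
-- where A reaches the module's undefined name 'cmp' (equal leading-underscore counts)
-- A raises NameError — excluded by Pre_ — and B returns the three-way comparison.

-- ===== PORT A =====
-- Python-2 'cmp' on strings: -1/0/1 by code-point lexicographic order.  The module's own
-- 'cmp' is UNDEFINED (NameError), so the branch that calls it lies outside Pre_undercmp;
-- this helper gives the port a total value there.
def pyCmp (l1 l2 : List Char) : Int :=
  (if decide (l2 < l1) then 1 else 0) - (if decide (l1 < l2) then 1 else 0)

-- literal transliteration of A's branch chain: startswith('_') = the head is '_';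
-- s[1:] = the tail; the recursion strips one underscore from each side.
def undercmpAux (l1 l2 : List Char) : Int :=
  if h : l1.head? = some '_' then
    (if l2.head? = some '_' then undercmpAux l1.tail l2.tail else 1)
  else if l2.head? = some '_' then -1
  else pyCmp l1 l2
termination_by l1.length
decreasing_by
  cases l1 with
  | nil => simp at h
  | cons c t => simp

def undercmp (s1 : String) (s2 : String) : Int :=
  undercmpAux s1.toList s2.toList

-- ===== PORT B =====
-- lstrip('_') is dropWhile (· == '_'); s[a:] with a = length of the underscore prefix is drop a.
def undercmp_alt (s1 : String) (s2 : String) : Int :=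
  let c1 := s1.toList
  let c2 := s2.toList
  let a := c1.length - (c1.dropWhile (· == '_')).length
  let b := c2.length - (c2.dropWhile (· == '_')).length
  if a ≠ b then (if a > b then 1 else -1)
  else
    let t1 := c1.drop a
    let t2 := c2.drop b
    (if decide (t2 < t1) then 1 else 0) - (if decide (t1 < t2) then 1 else 0)

-- ===== PRECONDITION & SPEC =====
-- number of leading underscores
def pvUnders (cs : List Char) : Nat := (cs.takeWhile (· == '_')).length

-- Pre_ excludes exactly the inputs with equal leading-underscore counts: there A calls the
-- name 'cmp', which the module never defines, and raises NameError (A returns no value).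
def Pre_undercmp (s1 : String) (s2 : String) : Prop :=
  pvUnders s1.toList ≠ pvUnders s2.toList
instance (s1 : String) (s2 : String) : Decidable (Pre_undercmp s1 s2) := by
  unfold Pre_undercmp; infer_instance

def pvWitness_undercmp : String × String := ("_a", "b")

-- On inputs whose leading-underscore counts are equal, A reaches its call to the undefined
-- name 'cmp' and raises NameError; B returns the three-way lexicographic comparison of the
-- suffixes after the common underscore prefix.
def Raises_undercmp (s1 : String) (s2 : String) : Prop :=
  pvUnders s1.toList = pvUnders s2.toList
instance (s1 : String) (s2 : String) : Decidable (Raises_undercmp s1 s2) := by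
  unfold Raises_undercmp; infer_instance

def pvRaiseWitness_undercmp : String × String := ("a", "b")
def pvRaiseWitnessOut_undercmp : Int := -1

def Spec_undercmp (s1 : String) (s2 : String) (out : Int) : Prop := out = undercmp_alt s1 s2
instance (s1 : String) (s2 : String) (out : Int) : Decidable (Spec_undercmp s1 s2 out) := by
  unfold Spec_undercmp; infer_instance

-- ===== CLAIM (what is proved, stated in full; the proofs are below) =====
def Claim_equal_undercmp : Prop := ∀ (s1 : String) (s2 : String), Dom_undercmp s1 s2 → Pre_undercmp s1 s2 → Spec_undercmp s1 s2 (undercmp s1 s2)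

def Claim_raises_undercmp : Prop := (∀ (s1 : String) (s2 : String), Dom_undercmp s1 s2 → Raises_undercmp s1 s2 → ¬ Pre_undercmp s1 s2) ∧ (Dom_undercmp (pvRaiseWitness_undercmp.1) (pvRaiseWitness_undercmp.2) ∧ Raises_undercmp (pvRaiseWitness_undercmp.1) (pvRaiseWitness_undercmp.2) ∧ undercmp_alt (pvRaiseWitness_undercmp.1) (pvRaiseWitness_undercmp.2) = pvRaiseWitnessOut_undercmp)

-- ===== LEMMAS AND PROOFS =====

lemma unders_cons (c : Char) (t : List Char) :
    pvUnders (c :: t) = if c = '_' then pvUnders t + 1 else 0 := by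
  by_cases h : c = '_' <;> simp [pvUnders, h]

-- A's recursion, when the counts differ, returns the sign of the count comparison.
lemma undercmpAux_of_ne (l1 l2 : List Char) (h : pvUnders l1 ≠ pvUnders l2) :
    undercmpAux l1 l2 = if pvUnders l1 > pvUnders l2 then 1 else -1 := by
  induction l1 generalizing l2 with
  | nil =>
    rw [undercmpAux]
    cases l2 with
    | nil => simp [pvUnders] at h
    | cons c2 t2 =>
      by_cases hc2 : c2 = '_'
      · subst hc2; simp [pvUnders]
      · rw [unders_cons, if_neg hc2] at h; simp [pvUnders] at h
  | cons c1 t1 ih =>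
    rw [undercmpAux]
    by_cases hc1 : c1 = '_'
    · subst hc1
      cases l2 with
      | nil => simp [pvUnders]
      | cons c2 t2 =>
        by_cases hc2 : c2 = '_'
        · subst hc2
          have h' : pvUnders t1 ≠ pvUnders t2 := by
            rw [unders_cons, unders_cons] at h; simp at h; omega
          simp only [List.head?_cons, List.tail_cons, dite_true, ite_true]
          rw [ih t2 h', unders_cons, unders_cons, if_pos rfl, if_pos rfl]
          split_ifs <;> omega
        · simp [hc2, unders_cons]
    · rw [unders_cons, if_neg hc1] at h
      simp only [List.head?_cons, Option.some.injEq, dif_neg hc1]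
      cases l2 with
      | nil => simp [pvUnders] at h
      | cons c2 t2 =>
        by_cases hc2 : c2 = '_'
        · subst hc2; simp [unders_cons, hc1]
        · rw [unders_cons, if_neg hc2] at h; simp at h

-- |takeWhile| = length - |dropWhile|
lemma unders_eq_sub (cs : List Char) :
    cs.length - (cs.dropWhile (· == '_')).length = pvUnders cs := by
  have h := congrArg List.length (List.takeWhile_append_dropWhile (p := (· == '_')) (l := cs))
  simp only [List.length_append] at h
  unfold pvUnders
  omega

-- ===== VERDICT (by name: the statement is the Claim_ definition above) =====
theorem undercmp_spec : Claim_equal_undercmp := by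
  intro s1 s2 _ hpre
  unfold Pre_undercmp at hpre
  unfold Spec_undercmp undercmp undercmp_alt
  simp only [unders_eq_sub]
  rw [if_pos hpre, undercmpAux_of_ne _ _ hpre]

@[simp] theorem undercmp_raises : Claim_raises_undercmp := by
  unfold Claim_raises_undercmp
  exact ⟨fun s1 s2 _ hr hp => hp hr, by decide⟩
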